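-- pv_equiv track=rewrite | github.com/ZaneGeiser/MyProjects | Roof-Rack-Scraper/RoofRackScraper/sort.py | find_part_num
-- ===== SOURCE A (Python) =====
-- def find_part_num(string):
--     """Sorts the given string and returns the longest number or alphanumeric word in the string.
--     Functionaly used to find the part number from a list representation of a given string."""
--     if string is None or string == "":
--         return ""
--
--     list = string.split()
--     #create a new list of words that contain integers.
--     new_list = []
--     for word in list:
--         if 'mm' in word or 'cm' in word: #exceptions to the longest word with integer rule as lengths will not be the part number.
--             continue
--         for char in word:
--             try:
--                 int(char)
--                 new_list += [word]
--             except: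
--                 continue
--     #if there are no integers, assume that there is not a part number.
--     if len(new_list) == 0:
--         return ""
--
--     #remove the special characters in characters_to_remove.
--     characters_to_remove = "()"
--     for word in new_list:
--         for character in characters_to_remove:
--             word = word.replace(character, "")
--
--     #return the longest word in the new list as this is almost always the part number.
--     return max(new_list, key=len)
-- ===== SOURCE B (Python) =====
-- def find_part_num(string):
--     """Sort the words by descending length (stable) and return the first
--     digit-containing word with no millimetre/centimetre substring; empty string if none."""
--     if not string:
--         return ""
--
--     def _is_candidate(word):
--         if 'mm' in word or 'cm' in word:
--             return False
--         for ch in word: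
--             try:
--                 int(ch)
--                 return True
--             except ValueError:
--                 pass
--         return False
--
--     for word in sorted(string.split(), key=len, reverse=True):
--         if _is_candidate(word):
--             return word
--     return ""
-- ===== Notes on version B (the rewrite author's own statement) =====
-- stated objective: simpler
-- what changed: B replaces A's duplicate-appending filter loop, dead parenthesis-stripping loop and max(key=len) with a stable descending sort by word length followed by a scan returning the first digit-containing word without a millimetre/centimetre substring.
import Mathlib
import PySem

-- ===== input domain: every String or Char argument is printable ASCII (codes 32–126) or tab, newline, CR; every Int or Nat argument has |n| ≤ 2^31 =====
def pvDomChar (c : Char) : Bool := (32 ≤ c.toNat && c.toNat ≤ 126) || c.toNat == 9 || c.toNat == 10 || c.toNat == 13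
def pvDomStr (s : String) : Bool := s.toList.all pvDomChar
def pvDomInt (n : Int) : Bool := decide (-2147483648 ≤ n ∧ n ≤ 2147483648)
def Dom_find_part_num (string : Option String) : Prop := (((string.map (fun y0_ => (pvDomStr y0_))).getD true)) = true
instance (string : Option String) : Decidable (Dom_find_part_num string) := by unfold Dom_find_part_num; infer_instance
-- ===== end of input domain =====

-- B: stable descending sort by length, then a scan returning the first qualifying word
-- (digit-containing, no unit suffix), instead of A's filter-with-duplicates loop + max(key=len); simpler.


-- ===== PORT A =====
def find_part_num (string : Option String) : String :=
  match string with
  | none => ""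
  | some s =>
    if s = "" then ""
    else
      let list := PySem.Str.split₀ s
      -- create a new list of words that contain integers (one append per digit char, as in A)
      let new_list : List String := list.foldl (fun acc word =>
        if PySem.Str.isIn "mm" word || PySem.Str.isIn "cm" word then acc
        else word.toList.foldl (fun acc2 char =>
          match PySem.Int.ofChars? [char] with
          | some _ => acc2 ++ [word]     -- int(char) succeeded
          | none => acc2) acc) []        -- except: continue
      if new_list.length = 0 then ""
      else
        -- A's parenthesis-removal loop only rebinds the loop variable; its results are discarded
        let _cleaned := new_list.map (fun word =>
          "()".toList.foldl (fun w character => PySem.Str.replace w (String.ofList [character]) "") word)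
        (PySem.List.max? new_list PySem.Str.len).getD ""

-- ===== PORT B =====
def pvIsCandidate (word : String) : Bool :=
  if PySem.Str.isIn "mm" word || PySem.Str.isIn "cm" word then false
  else word.toList.any (fun ch => (PySem.Int.ofChars? [ch]).isSome)

def pvFirstCandidate : List String → String
  | [] => ""
  | w :: ws => if pvIsCandidate w then w else pvFirstCandidate ws

def find_part_num_alt (string : Option String) : String :=
  match string with
  | none => ""
  | some s =>
    if s = "" then ""
    else pvFirstCandidate (PySem.List.sorted (PySem.Str.split₀ s) PySem.Str.len true)

-- ===== PRECONDITION & SPEC =====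
def Spec_find_part_num (string : Option String) (out : String) : Prop := out = find_part_num_alt string
instance (string : Option String) (out : String) : Decidable (Spec_find_part_num string out) := by unfold Spec_find_part_num; infer_instance

-- ===== CLAIM (what is proved, stated in full; the proofs are below) =====
def Claim_equal_find_part_num : Prop := ∀ (string : Option String), Dom_find_part_num string → Spec_find_part_num string (find_part_num string)

-- ===== LEMMAS AND PROOFS =====

-- the word A's inner loop appends, and the per-word contribution to new_list
def pvDigitCount (w : String) : Nat :=
  w.toList.countP (fun c => (PySem.Int.ofChars? [c]).isSome)

def pvContrib (w : String) : List String :=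
  if PySem.Str.isIn "mm" w || PySem.Str.isIn "cm" w then []
  else List.replicate (pvDigitCount w) w

-- max?'s folding step, for String with key = Str.len
def pvStep (acc : Option String) (x : String) : Option String :=
  match acc with
  | none => some x
  | some m => if PySem.Str.len m < PySem.Str.len x then some x else some m

lemma pvInner_eq (w : String) : ∀ (cs : List Char) (acc : List String),
    cs.foldl (fun acc2 char =>
      match PySem.Int.ofChars? [char] with
      | some _ => acc2 ++ [w]
      | none => acc2) acc
      = acc ++ List.replicate (cs.countP (fun c => (PySem.Int.ofChars? [c]).isSome)) w := by
  intro cs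
  induction cs with
  | nil => intro acc; simp
  | cons c cs ih =>
    intro acc
    by_cases h : (PySem.Int.ofChars? [c]).isSome
    · obtain ⟨v, hv⟩ := Option.isSome_iff_exists.mp h
      simp [List.foldl_cons, hv, ih, List.replicate_succ]
    · rw [Option.not_isSome_iff_eq_none] at h
      simp [List.foldl_cons, h, ih]

lemma pvNewList_eq : ∀ (ws : List String) (acc : List String),
    ws.foldl (fun acc word =>
      if PySem.Str.isIn "mm" word || PySem.Str.isIn "cm" word then acc
      else word.toList.foldl (fun acc2 char =>
        match PySem.Int.ofChars? [char] with
        | some _ => acc2 ++ [word]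
        | none => acc2) acc) acc
      = acc ++ ws.flatMap pvContrib := by
  intro ws
  induction ws with
  | nil => intro acc; simp
  | cons w ws ih =>
    intro acc
    simp only [List.foldl_cons]
    by_cases h : (PySem.Str.isIn "mm" w || PySem.Str.isIn "cm" w) = true
    · rw [if_pos h, ih, List.flatMap_cons,
        show pvContrib w = [] by unfold pvContrib; rw [if_pos h]]
      simp
    · rw [if_neg h, pvInner_eq w _ acc, ih, List.flatMap_cons,
        show pvContrib w = List.replicate (pvDigitCount w) w by unfold pvContrib; rw [if_neg h]]
      simp [pvDigitCount]

lemma pvContrib_nil_iff (w : String) : pvContrib w = [] ↔ pvIsCandidate w = false := by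
  unfold pvContrib pvIsCandidate
  by_cases h : (PySem.Str.isIn "mm" w || PySem.Str.isIn "cm" w) = true
  · rw [if_pos h, if_pos h]; simp
  · rw [if_neg h, if_neg h]
    simp [pvDigitCount, List.replicate_eq_nil_iff, List.countP_eq_zero, List.any_eq_false]

lemma pvFlatMap_nil_iff (ws : List String) :
    ws.flatMap pvContrib = [] ↔ ws.filter pvIsCandidate = [] := by
  induction ws with
  | nil => simp
  | cons w ws ih =>
    simp only [List.flatMap_cons, List.append_eq_nil_iff, List.filter_cons]
    by_cases h : pvIsCandidate w = true
    · simp [h, pvContrib_nil_iff, ih]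
    · simp only [Bool.not_eq_true] at h
      simp [h, pvContrib_nil_iff, ih]

lemma pvStep_idem (acc : Option String) (w : String) : pvStep (pvStep acc w) w = pvStep acc w := by
  cases acc with
  | none =>
    show pvStep (some w) w = some w
    rw [show pvStep (some w) w
        = if PySem.Str.len w < PySem.Str.len w then some w else some w from rfl,
      if_neg (lt_irrefl _)]
  | some m =>
    have e1 : pvStep (some m) w
        = if PySem.Str.len m < PySem.Str.len w then some w else some m := rfl
    by_cases h : PySem.Str.len m < PySem.Str.len w
    · rw [e1, if_pos h]
      rw [show pvStep (some w) w
          = if PySem.Str.len w < PySem.Str.len w then some w else some w from rfl,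
        if_neg (lt_irrefl _)]
    · rw [e1, if_neg h, e1, if_neg h]

lemma pvFold_replicate (w : String) (n : Nat) (acc : Option String) :
    (List.replicate n w).foldl pvStep acc = if n = 0 then acc else pvStep acc w := by
  induction n generalizing acc with
  | zero => simp
  | succ n ih =>
    rw [List.replicate_succ, List.foldl_cons, ih]
    by_cases h : n = 0
    · simp [h]
    · simp [h, pvStep_idem]

lemma pvMaxFold_flatMap (ws : List String) : ∀ (acc : Option String),
    (ws.flatMap pvContrib).foldl pvStep acc = (ws.filter pvIsCandidate).foldl pvStep acc := by
  induction ws with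
  | nil => intro acc; simp
  | cons w ws ih =>
    intro acc
    rw [List.flatMap_cons, List.foldl_append, List.filter_cons]
    by_cases h : pvIsCandidate w = true
    · have hb : ¬ (PySem.Str.isIn "mm" w || PySem.Str.isIn "cm" w) = true := by
        intro hb
        unfold pvIsCandidate at h
        rw [if_pos hb] at h
        exact Bool.false_ne_true h
      have hcount : pvDigitCount w ≠ 0 := by
        intro hz
        have hnil : pvContrib w = [] := by
          unfold pvContrib; rw [if_neg hb, hz]; rfl
        have := (pvContrib_nil_iff w).mp hnil
        simp [h] at this
      rw [show pvContrib w = List.replicate (pvDigitCount w) w by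
          unfold pvContrib; rw [if_neg hb],
        pvFold_replicate, if_neg hcount, if_pos h, List.foldl_cons]
      exact ih _
    · rw [show pvContrib w = [] from (pvContrib_nil_iff w).mpr (by simpa using h),
        List.foldl_nil, if_neg h]
      exact ih _

lemma pvMax_eq_step_fold (l : List String) :
    PySem.List.max? l PySem.Str.len = l.foldl pvStep none := by
  unfold PySem.List.max?
  exact PySem.List.foldl_congr_mem l _ pvStep none
    (fun acc x _ => by cases acc <;> rfl)

-- the 'before' relation sorted uses with reverse = true and key = Str.len
def pvBefore (a b : String) : Bool := decide (PySem.Str.len b < PySem.Str.len a)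

lemma pvSorted_eq_foldl (ws : List String) :
    PySem.List.sorted ws PySem.Str.len true
      = ws.foldl (fun acc x => PySem.List.insertBy pvBefore x acc) [] := by
  rfl

lemma pvFilter_insertBy (p : String → Bool) (w : String) (l : List String)
    (hl : l.Pairwise (fun a b => PySem.Str.len b ≤ PySem.Str.len a)) :
    (PySem.List.insertBy pvBefore w l).filter p
      = if p w then PySem.List.insertBy pvBefore w (l.filter p) else l.filter p := by
  induction l with
  | nil =>
    by_cases h : p w = true <;> simp [PySem.List.insertBy, h]
  | cons y ys ih =>
    have hy : ∀ z ∈ ys, PySem.Str.len z ≤ PySem.Str.len y := by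
      intro z hz; exact (List.pairwise_cons.mp hl).1 z hz
    have htl := (List.pairwise_cons.mp hl).2
    by_cases hb : pvBefore w y = true
    · -- w goes to the front of y :: ys
      have hlt : PySem.Str.len y < PySem.Str.len w := by
        simpa [pvBefore] using hb
      rw [show PySem.List.insertBy pvBefore w (y :: ys) = w :: y :: ys by
        simp [PySem.List.insertBy, hb]]
      by_cases hp : p w = true
      · -- insertBy into the filtered list also puts w first
        have : PySem.List.insertBy pvBefore w ((y :: ys).filter p)
            = w :: (y :: ys).filter p := by
          cases hf : (y :: ys).filter p with
          | nil => simp [PySem.List.insertBy]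
          | cons z zs =>
            have hz : z ∈ y :: ys := List.mem_of_mem_filter (hf ▸ List.mem_cons_self)
            have hzle : PySem.Str.len z ≤ PySem.Str.len y := by
              rcases List.mem_cons.mp hz with h' | h'
              · simp [h']
              · exact hy z h'
            have : pvBefore w z = true := by
              simp only [pvBefore, decide_eq_true_eq]; omega
            simp [PySem.List.insertBy, this]
        rw [if_pos hp, this, List.filter_cons_of_pos hp]
      · simp only [Bool.not_eq_true] at hp
        rw [if_neg (by simp [hp]), List.filter_cons_of_neg (by simp [hp])]
    · -- w goes after y
      rw [show PySem.List.insertBy pvBefore w (y :: ys)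
          = y :: PySem.List.insertBy pvBefore w ys by
        simp [PySem.List.insertBy, hb]]
      by_cases hp : p w = true
      · by_cases hpy : p y = true
        · rw [if_pos hp, List.filter_cons_of_pos hpy, ih htl, if_pos hp,
            List.filter_cons_of_pos hpy,
            show PySem.List.insertBy pvBefore w (y :: ys.filter p)
              = y :: PySem.List.insertBy pvBefore w (ys.filter p) by
              simp [PySem.List.insertBy, hb]]
        · simp only [Bool.not_eq_true] at hpy
          rw [if_pos hp, List.filter_cons_of_neg (by simp [hpy]), ih htl, if_pos hp,
            List.filter_cons_of_neg (by simp [hpy])]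
      · simp only [Bool.not_eq_true] at hp
        have hpw : ¬ (p w = true) := by simp [hp]
        rw [if_neg hpw, List.filter_cons, List.filter_cons, ih htl, if_neg hpw]

lemma pvFilter_sorted (p : String → Bool) (ws : List String) :
    (PySem.List.sorted ws PySem.Str.len true).filter p
      = PySem.List.sorted (ws.filter p) PySem.Str.len true := by
  induction ws using List.reverseRecOn with
  | nil => simp [PySem.List.sorted]
  | append_singleton ws w ih =>
    rw [pvSorted_eq_foldl, List.foldl_append, List.foldl_cons, List.foldl_nil,
      ← pvSorted_eq_foldl]
    rw [pvFilter_insertBy p w _ (PySem.List.sorted_pairwise_rev ws PySem.Str.len)]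
    rw [ih, List.filter_append]
    by_cases hp : p w = true
    · rw [if_pos hp, List.filter_cons_of_pos hp, List.filter_nil,
        pvSorted_eq_foldl (ws.filter p ++ [w]), List.foldl_append,
        List.foldl_cons, List.foldl_nil, ← pvSorted_eq_foldl]
    · simp only [Bool.not_eq_true] at hp
      have hpw : ¬ (p w = true) := by simp [hp]
      rw [if_neg hpw, List.filter_cons_of_neg hpw, List.filter_nil, List.append_nil]

lemma pvHead_sorted_eq_max (l : List String) :
    (PySem.List.sorted l PySem.Str.len true).head? = PySem.List.max? l PySem.Str.len := by
  induction l using List.reverseRecOn with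
  | nil => simp [PySem.List.sorted, PySem.List.max?]
  | append_singleton l x ih =>
    rw [pvSorted_eq_foldl, List.foldl_append, List.foldl_cons, List.foldl_nil,
      ← pvSorted_eq_foldl, pvMax_eq_step_fold, List.foldl_append, List.foldl_cons,
      List.foldl_nil, ← pvMax_eq_step_fold]
    cases hs : PySem.List.sorted l PySem.Str.len true with
    | nil =>
      have hl : l = [] := (PySem.List.sorted_eq_nil_iff l PySem.Str.len true).mp hs
      subst hl
      rfl
    | cons y ys =>
      have hmax : PySem.List.max? l PySem.Str.len = some y := by rw [← ih, hs]; rfl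
      rw [hmax]
      have e : pvStep (some y) x
          = if PySem.Str.len y < PySem.Str.len x then some x else some y := rfl
      by_cases hb : pvBefore x y = true
      · have hlt : PySem.Str.len y < PySem.Str.len x := by simpa [pvBefore] using hb
        rw [show PySem.List.insertBy pvBefore x (y :: ys) = x :: y :: ys by
          simp [PySem.List.insertBy, hb], e, if_pos hlt]
        rfl
      · have hnlt : ¬ PySem.Str.len y < PySem.Str.len x := by simpa [pvBefore] using hb
        rw [show PySem.List.insertBy pvBefore x (y :: ys)
            = y :: PySem.List.insertBy pvBefore x ys by
          simp [PySem.List.insertBy, hb], e, if_neg hnlt]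
        rfl

lemma pvFirstCandidate_eq (l : List String) :
    pvFirstCandidate l = ((l.filter pvIsCandidate).head?).getD "" := by
  induction l with
  | nil => simp [pvFirstCandidate]
  | cons w ws ih =>
    by_cases h : pvIsCandidate w = true
    · simp [pvFirstCandidate, h]
    · simp only [Bool.not_eq_true] at h
      simp [pvFirstCandidate, h, ih]

-- ===== VERDICT (by name: the statement is the Claim_ definition above) =====
theorem find_part_num_spec : Claim_equal_find_part_num := by
  intro string _hdom
  unfold Spec_find_part_num
  cases string with
  | none => rfl
  | some s =>
    by_cases hs : s = ""
    · simp [find_part_num, find_part_num_alt, hs]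
    · unfold find_part_num find_part_num_alt
      simp only [hs, if_neg, not_false_iff]
      set ws := PySem.Str.split₀ s with hws
      rw [pvNewList_eq ws []]
      simp only [List.nil_append]
      rw [pvFirstCandidate_eq, pvFilter_sorted, pvHead_sorted_eq_max]
      by_cases hnil : ws.filter pvIsCandidate = []
      · have h1 : ws.flatMap pvContrib = [] := (pvFlatMap_nil_iff ws).mpr hnil
        simp [h1, hnil, PySem.List.max?]
      · have h1 : ws.flatMap pvContrib ≠ [] := by
          intro h; exact hnil ((pvFlatMap_nil_iff ws).mp h)
        rw [if_neg (fun hlen => h1 (List.eq_nil_of_length_eq_zero hlen))]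
        rw [pvMax_eq_step_fold, pvMaxFold_flatMap, ← pvMax_eq_step_fold]
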